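-- pv_equiv track=rewrite | github.com/liaohaibing/MGST_GNN | data_generay_code/gen_div_data.py | gen_conn
-- ===== SOURCE A (Python) =====
-- def gen_conn(div_num,div_station_names):
--     div_station_names=list(div_station_names)
--     conn=[]
--     station_conns=[]
--     for i in range(div_num):
--         for j in range(div_num):
--             cell=[]
--             station_cell=[]
--             if i!=j:
--                 cell.append(i)
--                 cell.append(j)
--                 conn.append(cell)
--                 station_cell.append(div_station_names[i])
--                 station_cell.append(div_station_names[j])
--                 station_conns.append(station_cell)
--     return conn,station_conns
-- ===== SOURCE B (Python) =====
-- def gen_conn(div_num, div_station_names):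
--     names = list(div_station_names)
--     n = div_num if div_num > 0 else 0
--     m = n - 1
--     # decode each flat index k in [0, n*m) into the k-th ordered pair directly:
--     # row i = k // m, remainder r = k % m, and the column skips the diagonal
--     conn = []
--     for k in range(n * m):
--         i, r = divmod(k, m)
--         conn.append([i, r + 1 if r >= i else r])
--     station_conns = [[names[i], names[j]] for i, j in conn]
--     return conn, station_conns
-- ===== Notes on version B (the rewrite author's own statement) =====
-- stated objective: alternative
-- what changed: B replaces the nested i/j loops by a single flat loop over k in range(n*(n-1)) that arithmetically decodes each k with divmod into the k-th ordered pair (skipping the diagonal), then derives station_conns in a second pass over the already-built conn.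
import Mathlib
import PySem

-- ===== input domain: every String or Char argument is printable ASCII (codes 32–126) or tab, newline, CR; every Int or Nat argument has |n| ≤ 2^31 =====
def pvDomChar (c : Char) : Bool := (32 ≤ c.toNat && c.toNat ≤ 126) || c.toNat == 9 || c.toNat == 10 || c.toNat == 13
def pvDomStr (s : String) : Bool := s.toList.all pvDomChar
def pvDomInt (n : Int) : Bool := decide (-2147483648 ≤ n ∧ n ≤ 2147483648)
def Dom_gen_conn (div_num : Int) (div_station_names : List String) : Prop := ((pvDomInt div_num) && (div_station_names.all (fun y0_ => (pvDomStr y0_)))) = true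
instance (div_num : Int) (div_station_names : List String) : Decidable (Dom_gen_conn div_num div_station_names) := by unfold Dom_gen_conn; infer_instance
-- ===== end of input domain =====

-- B replaces A's nested i/j loops by a single flat loop over k in range(n*(n-1)) that decodes
-- each k with divmod into the k-th ordered pair, then derives station_conns by a second pass
-- over the already-built conn; objective: alternative (same asymptotic cost).

-- ===== PORT A =====
-- names[i] is ported as (pyGet? names i).getD ""; Pre_ guarantees the index is in range,
-- exactly where the Python returns instead of raising IndexError.
def gen_conn (div_num : Int) (div_station_names : List String) : List (List Int) × List (List String) :=
  (PySem.List.pyRange 0 div_num 1).foldl (fun acc i =>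
    (PySem.List.pyRange 0 div_num 1).foldl (fun acc j =>
      if i ≠ j then
        (acc.1 ++ [[i, j]],
         acc.2 ++ [[(PySem.List.pyGet? div_station_names i).getD "",
                    (PySem.List.pyGet? div_station_names j).getD ""]])
      else acc) acc) ([], [])

-- ===== PORT B =====
-- 'i, r = divmod(k, m)' then '[i, r + 1 if r >= i else r]'; m > 0 whenever the loop runs,
-- so Python's divmod returns there (floordiv/mod are PySem's floor-division primitives)
def pvDecode (m : Int) (k : Int) : List Int :=
  let i := PySem.Int.floordiv k m
  let r := PySem.Int.mod k m
  [i, if i ≤ r then r + 1 else r]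

-- unpacking 'for i, j in conn': every element of conn is a two-element list, matched literally
def pvNamePair (names : List String) (p : List Int) : List String :=
  match p with
  | [i, j] => [(PySem.List.pyGet? names i).getD "", (PySem.List.pyGet? names j).getD ""]
  | _ => []

def gen_conn_alt (div_num : Int) (div_station_names : List String) : List (List Int) × List (List String) :=
  let n : Int := if 0 < div_num then div_num else 0
  let m : Int := n - 1
  let conn := (PySem.List.pyRange 0 (n * m) 1).foldl (fun acc k => acc ++ [pvDecode m k]) []
  let station_conns := conn.map (pvNamePair div_station_names)
  (conn, station_conns)

-- ===== PRECONDITION & SPEC =====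
-- Pre_ excludes exactly the inputs where Python A raises IndexError: div_num ≥ 2 and
-- div_num > len(div_station_names) (B raises there too).
def Pre_gen_conn (div_num : Int) (div_station_names : List String) : Prop :=
  2 ≤ div_num → div_num ≤ (div_station_names.length : Int)
instance (div_num : Int) (div_station_names : List String) : Decidable (Pre_gen_conn div_num div_station_names) := by unfold Pre_gen_conn; infer_instance

def pvWitness_gen_conn : Int × List String := (2, ["a", "b"])

def Spec_gen_conn (div_num : Int) (div_station_names : List String) (out : List (List Int) × List (List String)) : Prop := out = gen_conn_alt div_num div_station_names
instance (div_num : Int) (div_station_names : List String) (out : List (List Int) × List (List String)) : Decidable (Spec_gen_conn div_num div_station_names out) := by unfold Spec_gen_conn; infer_instance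

-- ===== CLAIM (what is proved, stated in full; the proofs are below) =====
def Claim_equal_gen_conn : Prop := ∀ (div_num : Int) (div_station_names : List String), Dom_gen_conn div_num div_station_names → Pre_gen_conn div_num div_station_names → Spec_gen_conn div_num div_station_names (gen_conn div_num div_station_names)

-- ===== LEMMAS AND PROOFS =====

-- A's inner j-loop in closed form
lemma gen_conn_inner (dn : Int) (names : List String) (i : Int)
    (acc : List (List Int) × List (List String)) :
    (PySem.List.pyRange 0 dn 1).foldl (fun acc j =>
      if i ≠ j then
        (acc.1 ++ [[i, j]],
         acc.2 ++ [[(PySem.List.pyGet? names i).getD "",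
                    (PySem.List.pyGet? names j).getD ""]])
      else acc) acc
    = (acc.1 ++ ((PySem.List.pyRange 0 dn 1).filter (fun j => decide (i ≠ j))).map (fun j => [i, j]),
       acc.2 ++ ((PySem.List.pyRange 0 dn 1).filter (fun j => decide (i ≠ j))).map (fun j =>
         [(PySem.List.pyGet? names i).getD "", (PySem.List.pyGet? names j).getD ""])) := by
  obtain ⟨a, b⟩ := acc
  rw [PySem.List.foldl_ite_eq_foldl_filter,
      PySem.List.foldl_prod_mk (f := fun s j => s ++ [[i, j]])
        (g := fun s j => s ++ [[(PySem.List.pyGet? names i).getD "",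
                                (PySem.List.pyGet? names j).getD ""]]),
      PySem.List.foldl_append_singleton_eq_map, PySem.List.foldl_append_singleton_eq_map]

-- a pair of list accumulators extended per step is a pair of flatMaps
lemma gen_conn_outer {γ δ : Type} (R : List Int) (C : Int → List γ) (S : Int → List δ)
    (a : List γ) (b : List δ) :
    R.foldl (fun acc i => (acc.1 ++ C i, acc.2 ++ S i)) (a, b)
    = (a ++ R.flatMap C, b ++ R.flatMap S) := by
  rw [PySem.List.foldl_prod_mk (f := fun s i => s ++ C i) (g := fun s i => s ++ S i),
      PySem.List.foldl_append_eq_flatMap, PySem.List.foldl_append_eq_flatMap]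

-- filtering i out of range(dn) leaves the two ranges around the diagonal
lemma gen_conn_filter (dn i : Int) (h0 : 0 ≤ i) (h1 : i < dn) :
    (PySem.List.pyRange 0 dn 1).filter (fun j => decide (i ≠ j))
    = PySem.List.pyRange 0 i 1 ++ PySem.List.pyRange (i + 1) dn 1 := by
  rw [PySem.List.pyRange_one_append 0 i dn h0 (le_of_lt h1),
      PySem.List.pyRange_one_cons h1, List.filter_append, List.filter_cons]
  simp only [ne_eq, not_true_eq_false, decide_false, Bool.false_eq_true, if_false]
  rw [List.filter_eq_self.mpr, List.filter_eq_self.mpr]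
  · intro x hx
    rw [PySem.List.mem_pyRange_one] at hx
    simp only [decide_eq_true_eq]
    omega
  · intro x hx
    rw [PySem.List.mem_pyRange_one] at hx
    simp only [decide_eq_true_eq]
    omega

-- decoding one block of m = n-1 flat indices yields row i of A's pair list
lemma gen_conn_block (n i : Int) (h0 : 0 ≤ i) (h1 : i < n) :
    (PySem.List.pyRange (i * (n - 1)) (i * (n - 1) + (n - 1)) 1).map (pvDecode (n - 1))
    = (PySem.List.pyRange 0 i 1 ++ PySem.List.pyRange (i + 1) n 1).map (fun j => [i, j]) := by
  apply List.ext_getElem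
  · simp [PySem.List.length_pyRange_one]
    omega
  · intro k hk hk'
    simp only [PySem.List.length_pyRange_one, List.length_map] at hk
    have hm : 0 < n - 1 := by omega
    have hdec : pvDecode (n - 1) (i * (n - 1) + (k : Int))
        = [i, if i ≤ (k : Int) then (k : Int) + 1 else (k : Int)] := by
      have hfd : PySem.Int.floordiv (i * (n - 1) + (k : Int)) (n - 1) = i := by
        rw [PySem.Int.floordiv_eq_iff_of_pos hm]
        constructor <;> nlinarith [Int.toNat_of_nonneg (le_of_lt hm), (by omega : (k : Int) < n - 1)]
      have hmod : PySem.Int.mod (i * (n - 1) + (k : Int)) (n - 1) = (k : Int) := by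
        have := PySem.Int.floordiv_mul_add_mod (i * (n - 1) + (k : Int)) (n - 1)
        rw [hfd] at this
        omega
      simp [pvDecode, hfd, hmod]
    rw [List.getElem_map, PySem.List.getElem_pyRange_one, hdec, List.getElem_map]
    by_cases hki : k < (PySem.List.pyRange 0 i 1).length
    · rw [List.getElem_append_left hki]
      rw [PySem.List.length_pyRange_one] at hki
      rw [PySem.List.getElem_pyRange_one]
      have : (k : Int) < i := by omega
      simp only [zero_add]
      rw [if_neg (by omega)]
    · rw [List.getElem_append_right (le_of_not_gt hki)]
      rw [PySem.List.getElem_pyRange_one]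
      rw [PySem.List.length_pyRange_one] at hki ⊢
      have h2 : i ≤ (k : Int) := by omega
      rw [if_pos h2]
      simp only [List.cons.injEq, and_true, true_and]
      omega
  
-- the flat decode loop over t rows equals A's first t rows
lemma gen_conn_rows (n : Int) (t : Nat) (ht : (t : Int) ≤ n) :
    (PySem.List.pyRange 0 ((t : Int) * (n - 1)) 1).map (pvDecode (n - 1))
    = (PySem.List.pyRange 0 (t : Int) 1).flatMap
        (fun i => (PySem.List.pyRange 0 i 1 ++ PySem.List.pyRange (i + 1) n 1).map (fun j => [i, j])) := by
  induction t with
  | zero => simp [PySem.List.pyRange_zero]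
  | succ s ih =>
    have hs : (s : Int) ≤ n := by push_cast at ht ⊢; omega
    have hm : 0 ≤ n - 1 := by push_cast at ht; omega
    have hsplit : ((s : Int) + 1) * (n - 1) = (s : Int) * (n - 1) + (n - 1) := by ring
    push_cast
    rw [hsplit,
        PySem.List.pyRange_one_append 0 ((s : Int) * (n - 1)) ((s : Int) * (n - 1) + (n - 1))
          (by positivity) (by omega),
        PySem.List.pyRange_one_succ_right (by positivity),
        List.map_append, List.flatMap_append, ih hs, List.flatMap_singleton,
        gen_conn_block n s (by positivity) (by push_cast at ht; omega)]

-- B's pair list equals A's pair list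
lemma gen_conn_conn_eq (dn : Int) :
    (PySem.List.pyRange 0 ((if 0 < dn then dn else 0) * ((if 0 < dn then dn else 0) - 1)) 1).map
      (pvDecode ((if 0 < dn then dn else 0) - 1))
    = (PySem.List.pyRange 0 dn 1).flatMap
        (fun i => (PySem.List.pyRange 0 i 1 ++ PySem.List.pyRange (i + 1) dn 1).map (fun j => [i, j])) := by
  by_cases h : 0 < dn
  · rw [if_pos h]
    have : dn = ((dn.toNat : Nat) : Int) := by omega
    rw [this]
    exact gen_conn_rows _ dn.toNat (le_refl _)
  · rw [if_neg h, PySem.List.pyRange_one_eq_nil (by omega), PySem.List.pyRange_one_eq_nil (by omega)]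
    simp

-- ===== VERDICT (by name: the statement is the Claim_ definition above) =====
theorem gen_conn_spec : Claim_equal_gen_conn := by
  intro dn names _ _
  unfold Spec_gen_conn gen_conn gen_conn_alt
  simp only [gen_conn_inner, gen_conn_outer, List.nil_append,
             PySem.List.foldl_append_singleton_eq_map]
  have hfilter : ∀ i ∈ PySem.List.pyRange 0 dn 1,
      (PySem.List.pyRange 0 dn 1).filter (fun j => decide (i ≠ j))
      = PySem.List.pyRange 0 i 1 ++ PySem.List.pyRange (i + 1) dn 1 := by
    intro i hi
    rw [PySem.List.mem_pyRange_one] at hi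
    exact gen_conn_filter dn i hi.1 hi.2
  have hconn : (PySem.List.pyRange 0 dn 1).flatMap
      (fun i => ((PySem.List.pyRange 0 dn 1).filter (fun j => decide (i ≠ j))).map (fun j => [i, j]))
      = (PySem.List.pyRange 0 ((if 0 < dn then dn else 0) * ((if 0 < dn then dn else 0) - 1)) 1).map
          (pvDecode ((if 0 < dn then dn else 0) - 1)) := by
    rw [gen_conn_conn_eq]
    exact List.flatMap_congr (fun i hi => by rw [hfilter i hi])
  rw [Prod.mk.injEq]
  refine ⟨hconn, ?_⟩
  rw [← hconn, List.map_flatMap]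
  apply List.flatMap_congr
  intro i hi
  rw [List.map_map]
  rfl
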